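-- pv_equiv track=rewrite | github.com/SyedaAfiaShah/DeGenome-A-Decentralized-Privacy-Preserving-Infrastructure-for-Secure-Genomic-Data-Sharing | backend/services/institutions.py | is_institutional_email
-- ===== SOURCE A (Python) =====
-- INSTITUTIONAL_DOMAINS = {
--     # Generic academic TLDs
--     ".edu", ".ac.uk", ".ac.in", ".ac.jp", ".ac.za", ".ac.nz", ".ac.kr",
--     ".edu.au", ".edu.pk", ".edu.cn", ".edu.br", ".edu.mx",
--     # Public research institutions
--     "nih.gov", "who.int", "cdc.gov", "ebi.ac.uk", "sanger.ac.uk",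
--     "broadinstitute.org", "wellcome.org", "embl.org", "ncbi.nlm.nih.gov",
--     "genome.gov", "cancer.gov", "nist.gov", "nasa.gov",
--     # Major research universities (explicit)
--     "mit.edu", "stanford.edu", "harvard.edu", "ox.ac.uk", "cam.ac.uk",
--     "ethz.ch", "epfl.ch", "tum.de", "imperial.ac.uk", "ucl.ac.uk",
-- }
--
-- def is_institutional_email(email: str) -> bool:
--     """
--     Returns True if the email domain matches a known academic or
--     research institution. Case insensitive.
--     """
--     email = email.lower().strip()
--     domain = email.split("@")[-1] if "@" in email else ""
--     if not domain:
--         return False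
--
--     if domain in INSTITUTIONAL_DOMAINS:
--         return True
--
--     for inst_domain in INSTITUTIONAL_DOMAINS:
--         if inst_domain.startswith(".") and domain.endswith(inst_domain):
--             return True
--
--     return False
-- ===== SOURCE B (Python) =====
-- INSTITUTIONAL_DOMAINS = {
--     # Generic academic TLDs
--     ".edu", ".ac.uk", ".ac.in", ".ac.jp", ".ac.za", ".ac.nz", ".ac.kr",
--     ".edu.au", ".edu.pk", ".edu.cn", ".edu.br", ".edu.mx",
--     # Public research institutions
--     "nih.gov", "who.int", "cdc.gov", "ebi.ac.uk", "sanger.ac.uk",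
--     "broadinstitute.org", "wellcome.org", "embl.org", "ncbi.nlm.nih.gov",
--     "genome.gov", "cancer.gov", "nist.gov", "nasa.gov",
--     # Major research universities (explicit)
--     "mit.edu", "stanford.edu", "harvard.edu", "ox.ac.uk", "cam.ac.uk",
--     "ethz.ch", "epfl.ch", "tum.de", "imperial.ac.uk", "ucl.ac.uk",
-- }
--
-- # suffix patterns: the entries that start with '.' (matched as dot-anchored suffixes)
-- _DOTTED = frozenset(d for d in INSTITUTIONAL_DOMAINS if d.startswith("."))
--
--
-- def is_institutional_email(email: str) -> bool:
--     email = email.lower().strip()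
--     if "@" not in email:
--         return False
--     domain = email.split("@")[-1]
--     if not domain:
--         return False
--     if domain in INSTITUTIONAL_DOMAINS:
--         return True
--     # look up each dot-anchored suffix of the domain instead of scanning the set
--     return any(domain[i:] in _DOTTED for i, ch in enumerate(domain) if ch == ".")
-- ===== Notes on version B (the rewrite author's own statement) =====
-- stated objective: alternative
-- what changed: Instead of scanning the whole constant set with endswith for each query, B enumerates the domain's dot-anchored suffixes and looks each up in a precomputed frozenset of the dotted patterns (traversal inverted: loop over the input, set used only for O(1) lookups).
import Mathlib
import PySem

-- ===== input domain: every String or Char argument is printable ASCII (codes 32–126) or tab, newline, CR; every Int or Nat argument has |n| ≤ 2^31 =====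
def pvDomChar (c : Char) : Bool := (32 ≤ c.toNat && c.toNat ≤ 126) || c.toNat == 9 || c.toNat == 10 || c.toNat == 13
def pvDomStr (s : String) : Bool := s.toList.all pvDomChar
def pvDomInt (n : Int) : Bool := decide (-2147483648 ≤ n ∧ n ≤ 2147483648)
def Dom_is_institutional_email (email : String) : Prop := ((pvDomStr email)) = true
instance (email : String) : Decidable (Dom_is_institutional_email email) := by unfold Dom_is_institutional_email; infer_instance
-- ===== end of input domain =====

-- B inverts the traversal: instead of scanning the constant set with endswith, it enumerates the
-- domain's dot-anchored suffixes and looks each up in the set of dotted patterns (alternative decomposition).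

-- ===== PORT A =====
-- the module-level set INSTITUTIONAL_DOMAINS (distinct string literals, source order)
def instDomains : List String :=
  [".edu", ".ac.uk", ".ac.in", ".ac.jp", ".ac.za", ".ac.nz", ".ac.kr",
   ".edu.au", ".edu.pk", ".edu.cn", ".edu.br", ".edu.mx",
   "nih.gov", "who.int", "cdc.gov", "ebi.ac.uk", "sanger.ac.uk",
   "broadinstitute.org", "wellcome.org", "embl.org", "ncbi.nlm.nih.gov",
   "genome.gov", "cancer.gov", "nist.gov", "nasa.gov",
   "mit.edu", "stanford.edu", "harvard.edu", "ox.ac.uk", "cam.ac.uk",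
   "ethz.ch", "epfl.ch", "tum.de", "imperial.ac.uk", "ucl.ac.uk"]

def is_institutional_email (email : String) : Bool :=
  let e := PySem.Str.strip (PySem.Str.lower email)
  let domain := if PySem.Str.isIn "@" e then ((PySem.Str.split? e "@").getD [e]).getLastD "" else ""
  if domain = "" then false
  else if instDomains.contains domain then true
  else instDomains.any (fun d => PySem.Str.startswith d "." && PySem.Str.endswith domain d)

-- ===== PORT B =====
-- _DOTTED = the entries of the set that start with '.'
def dottedDomains : List String := instDomains.filter (fun d => PySem.Str.startswith d ".")

def is_institutional_email_alt (email : String) : Bool :=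
  let e := PySem.Str.strip (PySem.Str.lower email)
  if !(PySem.Str.isIn "@" e) then false
  else
    let domain := ((PySem.Str.split? e "@").getD [e]).getLastD ""
    if domain = "" then false
    else if instDomains.contains domain then true
    else (PySem.List.enumerate domain.toList 0).any
      (fun p => p.2 == '.' && dottedDomains.contains (PySem.Str.slice domain (some p.1) none))

-- ===== PRECONDITION & SPEC =====
def Spec_is_institutional_email (email : String) (out : Bool) : Prop := out = is_institutional_email_alt email
instance (email : String) (out : Bool) : Decidable (Spec_is_institutional_email email out) := by unfold Spec_is_institutional_email; infer_instance

-- ===== CLAIM (what is proved, stated in full; the proofs are below) =====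
def Claim_equal_is_institutional_email : Prop := ∀ (email : String), Dom_is_institutional_email email → Spec_is_institutional_email email (is_institutional_email email)

-- ===== LEMMAS AND PROOFS =====

-- a dot-anchored pattern is a suffix iff it occurs as the full suffix at some '.'-position
lemma suffix_dot_iff (dl r : List Char) :
    ('.' :: r <:+ dl) ↔ ∃ k : Nat, ∃ _ : k < dl.length, dl[k] = '.' ∧ dl.drop k = '.' :: r := by
  constructor
  · rintro ⟨pre, hpre⟩
    subst hpre
    refine ⟨pre.length, by simp only [List.length_append, List.length_cons]; omega, ?_, by simp⟩
    rw [List.getElem_append_right (le_refl pre.length)]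
    simp
  · rintro ⟨k, hk, _, hdrop⟩
    exact hdrop ▸ List.drop_suffix k dl

lemma a_any_iff (domain : String) :
    (instDomains.any (fun d => PySem.Str.startswith d "." && PySem.Str.endswith domain d) = true)
  ↔ ∃ d ∈ dottedDomains, d.toList <:+ domain.toList := by
  simp only [List.any_eq_true, Bool.and_eq_true, dottedDomains, List.mem_filter,
    PySem.Str.endswith_eq, PySem.Chars.endswith_iff]
  constructor
  · rintro ⟨d, hd, hs, he⟩; exact ⟨d, ⟨hd, hs⟩, by simpa using he⟩
  · rintro ⟨d, ⟨hd, hs⟩, he⟩; exact ⟨d, hd, hs, by simpa using he⟩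

lemma alt_any_iff (domain : String) :
    ((PySem.List.enumerate domain.toList 0).any
      (fun p => p.2 == '.' && dottedDomains.contains (PySem.Str.slice domain (some p.1) none)) = true)
  ↔ ∃ k : Nat, ∃ _ : k < domain.toList.length,
      domain.toList[k] = '.' ∧ PySem.Str.slice domain (some (k : Int)) none ∈ dottedDomains := by
  simp only [List.any_eq_true, Bool.and_eq_true, beq_iff_eq, List.contains_eq_mem,
    decide_eq_true_eq, PySem.List.mem_enumerate_iff]
  constructor
  · rintro ⟨p, ⟨k, hk, rfl⟩, hdot, hmem⟩
    exact ⟨k, hk, by simpa using hdot, by simpa using hmem⟩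
  · rintro ⟨k, hk, hdot, hmem⟩
    exact ⟨((k : Int), domain.toList[k]), ⟨k, hk, by simp⟩, by simpa using hdot, by simpa using hmem⟩

lemma toList_slice_from (domain : String) (k : Nat) :
    (PySem.Str.slice domain (some (k : Int)) none).toList = domain.toList.drop k := by
  rw [PySem.Str.toList_slice]
  simp [PySem.Chars.slice, PySem.List.slice_from_natCast]

-- the core inversion: scanning the patterns with endswith = scanning the domain's dot positions with lookups
lemma scan_eq_lookup (domain : String) :
    (instDomains.any (fun d => PySem.Str.startswith d "." && PySem.Str.endswith domain d))
  = ((PySem.List.enumerate domain.toList 0).any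
      (fun p => p.2 == '.' && dottedDomains.contains (PySem.Str.slice domain (some p.1) none))) := by
  rw [Bool.eq_iff_iff, a_any_iff, alt_any_iff]
  constructor
  · rintro ⟨d, hd, hsuf⟩
    have hs : PySem.Str.startswith d "." = true := (List.mem_filter.mp hd).2
    obtain ⟨t, ht⟩ := (PySem.Chars.startswith_iff _ _).mp (by simpa using hs)
    have hd' : d.toList = '.' :: t := by simpa using ht.symm
    rw [hd'] at hsuf
    obtain ⟨k, hk, hdot, hdrop⟩ := (suffix_dot_iff _ _).mp hsuf
    refine ⟨k, hk, hdot, ?_⟩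
    have heq : (PySem.Str.slice domain (some (k : Int)) none).toList = d.toList := by
      rw [toList_slice_from, hdrop, hd']
    rw [String.toList_inj.mp heq]
    exact hd
  · rintro ⟨k, hk, hdot, hmem⟩
    refine ⟨_, hmem, ?_⟩
    rw [toList_slice_from]
    exact List.drop_suffix k domain.toList

-- ===== VERDICT (by name: the statement is the Claim_ definition above) =====
theorem is_institutional_email_spec : Claim_equal_is_institutional_email := by
  intro email _
  unfold Spec_is_institutional_email is_institutional_email is_institutional_email_alt
  cases h : PySem.Str.isIn "@" (PySem.Str.strip (PySem.Str.lower email)) with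
  | false =>
    simp only [h, Bool.not_false, if_true, Bool.false_eq_true, if_false]
  | true =>
    simp only [h, Bool.not_true, if_true, Bool.false_eq_true, if_false]
    split
    · rfl
    · split
      · rfl
      · exact scan_eq_lookup _
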